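-- pv_equiv track=rewrite | github.com/17wadeche/validation_V2 | src/validation_agent/docx_utils.py | _looks_instructional
-- ===== SOURCE A (Python) =====
-- def _looks_instructional(text: str) -> bool:
--     lowered = text.strip().lower()
--     if not lowered:
--         return False
--     phrases = (
--         "enter ",
--         "describe ",
--         "provide ",
--         "summarize ",
--         "explain ",
--         "insert ",
--         "complete ",
--     )
--     return any(lowered.startswith(p) or f" {p}" in lowered for p in phrases)
-- ===== SOURCE B (Python) =====
-- PREFIXES = {"enter", "describe", "provide", "summarize", "explain", "insert", "complete"}
--
-- def _looks_instructional(text: str) -> bool: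
--     words = text.strip().lower().split(' ')
--     return any(w in PREFIXES for w in words[:-1])
-- ===== Notes on version B (the rewrite author's own statement) =====
-- stated objective: simpler
-- what changed: Instead of running seven startswith/substring scans of the whole lowered text, B splits the lowered text once on the single-space separator and checks whether any non-final token is in a set of the seven bare words.
import Mathlib
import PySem

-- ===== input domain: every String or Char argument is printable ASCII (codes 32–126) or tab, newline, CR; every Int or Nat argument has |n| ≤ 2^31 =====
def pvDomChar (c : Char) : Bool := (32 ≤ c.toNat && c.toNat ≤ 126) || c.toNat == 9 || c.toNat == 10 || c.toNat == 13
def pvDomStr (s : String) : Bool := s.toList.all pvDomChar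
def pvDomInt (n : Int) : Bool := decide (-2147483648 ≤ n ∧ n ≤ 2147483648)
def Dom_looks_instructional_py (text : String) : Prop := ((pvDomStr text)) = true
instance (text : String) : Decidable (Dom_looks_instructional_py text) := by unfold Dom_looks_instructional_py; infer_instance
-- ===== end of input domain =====

-- B replaces A's seven startswith/substring scans of the whole text by one split(' ') pass
-- whose non-final tokens are looked up in a set of the seven bare words (objective: simpler).

-- ===== PORT A =====
def looks_instructional_py (text : String) : Bool :=
  let lowered : List Char := PySem.Chars.lower (PySem.Chars.strip text.toList)
  if lowered = [] then false
  else
    ["enter ".toList, "describe ".toList, "provide ".toList, "summarize ".toList,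
     "explain ".toList, "insert ".toList, "complete ".toList].any
      (fun p => PySem.Chars.startswith lowered p || PySem.Chars.isIn (' ' :: p) lowered)

-- ===== PORT B =====
def pvPrefixSet : PySem.Set (List Char) :=
  PySem.Set.ofList ["enter".toList, "describe".toList, "provide".toList, "summarize".toList,
    "explain".toList, "insert".toList, "complete".toList]

def looks_instructional_py_alt (text : String) : Bool :=
  let words := PySem.Chars.splitOn (PySem.Chars.lower (PySem.Chars.strip text.toList)) [' ']
  (PySem.List.slice words none (some (-1))).any (fun w => PySem.Set.contains pvPrefixSet w)

-- ===== PRECONDITION & SPEC =====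
def Spec_looks_instructional_py (text : String) (out : Bool) : Prop := out = looks_instructional_py_alt text
instance (text : String) (out : Bool) : Decidable (Spec_looks_instructional_py text out) := by unfold Spec_looks_instructional_py; infer_instance

-- ===== CLAIM (what is proved, stated in full; the proofs are below) =====
def Claim_equal_looks_instructional_py : Prop := ∀ (text : String), Dom_looks_instructional_py text → Spec_looks_instructional_py text (looks_instructional_py text)

-- ===== LEMMAS AND PROOFS =====

/-- Reference form of `PySem.Chars.splitOn l [' ']` (Python's `s.split(' ')`). -/
def pvTokens : List Char → List (List Char)
  | [] => [[]]
  | c :: l => if c = ' ' then [] :: pvTokens l else (pvTokens l).modifyHead (c :: ·)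

theorem pvTokens_ne_nil : ∀ l : List Char, pvTokens l ≠ []
  | [] => by simp [pvTokens]
  | c :: l => by
      unfold pvTokens
      cases hl : pvTokens l with
      | nil => exact absurd hl (pvTokens_ne_nil l)
      | cons h t => split <;> simp

theorem pvGo_spec : ∀ (fuel : Nat) (l cur : List Char) (accs : List (List Char)),
    l.length < fuel →
    PySem.Chars.splitOn.go [' '] fuel l cur accs
      = accs.reverse ++ (pvTokens l).modifyHead (cur.reverse ++ ·) := by
  intro fuel
  induction fuel with
  | zero => intro l cur accs h; omega
  | succ fuel ih =>
    intro l cur accs h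
    cases l with
    | nil => simp [PySem.Chars.splitOn.go, pvTokens]
    | cons c rest =>
      by_cases hc : c = ' '
      · subst hc
        have hpre : ([' '] : List Char).isPrefixOf (' ' :: rest) = true := by
          simp [List.isPrefixOf]
        simp only [PySem.Chars.splitOn.go, hpre, if_true]
        rw [ih _ _ _ (by simpa using Nat.lt_of_succ_lt_succ h)]
        cases hr : pvTokens rest with
        | nil => exact absurd hr (pvTokens_ne_nil rest)
        | cons th tt => simp [pvTokens, hr]
      · have hpre : ([' '] : List Char).isPrefixOf (c :: rest) = false := by
          simp [List.isPrefixOf]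
          exact fun hcc => hc hcc.symm
        simp only [PySem.Chars.splitOn.go, hpre, Bool.false_eq_true, if_false]
        rw [ih _ _ _ (by simpa using Nat.lt_of_succ_lt_succ h)]
        cases hr : pvTokens rest with
        | nil => exact absurd hr (pvTokens_ne_nil rest)
        | cons th tt => simp [pvTokens, hr, hc]

theorem pvSplitOn_eq (l : List Char) : PySem.Chars.splitOn l [' '] = pvTokens l := by
  unfold PySem.Chars.splitOn
  rw [pvGo_spec _ _ _ _ (by omega)]
  cases hr : pvTokens l with
  | nil => exact absurd hr (pvTokens_ne_nil l)
  | cons th tt => simp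

/-- A non-final-word prefix `u ++ " "` of `l` is exactly the first token of `l`. -/
theorem pvPrefix_token : ∀ (l : List Char) (u h : List Char) (t : List (List Char)),
    pvTokens l = h :: t → ' ' ∉ u → ((u ++ [' ']) <+: l ↔ (u = h ∧ t ≠ [])) := by
  intro l
  induction l with
  | nil =>
    intro u h t hT hu
    simp [pvTokens] at hT
    simp [hT.1, hT.2]
  | cons c l ih =>
    intro u h t hT hu
    by_cases hc : c = ' '
    · subst hc
      simp only [pvTokens, if_true, List.cons.injEq] at hT
      cases u with
      | nil =>
        simp only [List.nil_append, List.cons_prefix_cons]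
        simp [hT.1.symm, ← hT.2, pvTokens_ne_nil l]
      | cons a u' =>
        have ha : a ≠ ' ' := fun he => hu (he ▸ List.mem_cons_self)
        simp only [List.cons_append, List.cons_prefix_cons]
        simp [ha, ← hT.1]
    · simp only [pvTokens, hc, if_false] at hT
      cases hl : pvTokens l with
      | nil => exact absurd hl (pvTokens_ne_nil l)
      | cons h' t' =>
        rw [hl] at hT
        simp only [List.modifyHead_cons, List.cons.injEq] at hT
        cases u with
        | nil =>
          simp only [List.nil_append, List.cons_prefix_cons]
          constructor
          · rintro ⟨he, -⟩; exact absurd he.symm hc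
          · rintro ⟨he, -⟩; rw [← hT.1] at he; simp at he
        | cons a u' =>
          have hu' : ' ' ∉ u' := fun hm => hu (List.mem_cons_of_mem _ hm)
          simp only [List.cons_append, List.cons_prefix_cons]
          rw [ih u' h' t' hl hu']
          constructor
          · rintro ⟨rfl, rfl, ht⟩; exact ⟨by rw [← hT.1], by rwa [← hT.2]⟩
          · rintro ⟨he, ht⟩
            rw [← hT.1] at he
            obtain ⟨rfl, rfl⟩ := List.cons.injEq .. ▸ he
            exact ⟨rfl, rfl, by rwa [hT.2]⟩

/-- `" " ++ w ++ " "` occurs inside `l` iff `w` is a non-first, non-final token of `l`. -/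
theorem pvInfix_tail (w : List Char) (hw : ' ' ∉ w) :
    ∀ l : List Char, ((' ' :: (w ++ [' '])) <:+: l ↔ w ∈ ((pvTokens l).dropLast).tail) := by
  intro l
  induction l with
  | nil => simp [pvTokens]
  | cons c l ih =>
    rw [List.infix_cons_iff]
    cases hl : pvTokens l with
    | nil => exact absurd hl (pvTokens_ne_nil l)
    | cons h' t' =>
      rw [hl] at ih
      by_cases hc : c = ' '
      · subst hc
        simp only [List.cons_prefix_cons, true_and]
        rw [pvPrefix_token l w h' t' hl hw]
        simp only [pvTokens, if_true, hl]
        cases t' with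
        | nil => simp [ih]
        | cons x t'' =>
          simp only [List.dropLast_cons₂, List.tail_cons] at ih ⊢
          rw [ih]
          simp only [List.mem_cons, ne_eq]
          tauto
      · have hpre : ¬ ((' ' :: (w ++ [' '])) <+: c :: l) := by
          simp only [List.cons_prefix_cons]
          rintro ⟨he, -⟩; exact hc he.symm
        simp only [hpre, false_or]
        rw [ih]
        simp only [pvTokens, hc, if_false, hl, List.modifyHead_cons]
        cases t' with
        | nil => simp
        | cons x t'' => simp [List.dropLast_cons₂]

/-- The phrase test of A, for one bare word `w`, is non-final-token membership. -/
theorem pvKey (l w : List Char) (hw : ' ' ∉ w) :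
    (((w ++ [' ']) <+: l) ∨ ((' ' :: (w ++ [' '])) <:+: l)) ↔ w ∈ (pvTokens l).dropLast := by
  cases hl : pvTokens l with
  | nil => exact absurd hl (pvTokens_ne_nil l)
  | cons h t =>
    rw [pvPrefix_token l w h t hl hw]
    have h2 := pvInfix_tail w hw l
    rw [hl] at h2
    rw [h2]
    cases t with
    | nil => simp
    | cons x t' =>
      simp only [List.dropLast_cons₂, List.tail_cons, List.mem_cons, ne_eq]
      tauto

theorem pvWord (L w : List Char) (hw : ' ' ∉ w) :
    (PySem.Chars.startswith L (w ++ [' ']) || PySem.Chars.isIn (' ' :: (w ++ [' '])) L)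
      = decide (w ∈ (pvTokens L).dropLast) := by
  rw [Bool.eq_iff_iff]
  simp only [Bool.or_eq_true, PySem.Chars.startswith_iff, PySem.Chars.isIn_iff_infix,
    decide_eq_true_eq]
  exact pvKey L w hw

theorem pvAnySwap (xs ws : List (List Char)) :
    xs.any (fun t => ws.contains t) = ws.any (fun w => decide (w ∈ xs)) := by
  rw [Bool.eq_iff_iff]
  simp only [List.any_eq_true, List.contains_iff_mem, decide_eq_true_eq]
  tauto

-- ===== VERDICT (by name: the statement is the Claim_ definition above) =====
theorem looks_instructional_py_spec : Claim_equal_looks_instructional_py := by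
  intro text _dom
  unfold Spec_looks_instructional_py looks_instructional_py looks_instructional_py_alt
  set L : List Char := PySem.Chars.lower (PySem.Chars.strip text.toList) with hL
  have hslice : ∀ ws : List (List Char), PySem.List.slice ws none (some (-1)) = ws.dropLast := by
    intro ws; simp [pysem]
  simp only [pvSplitOn_eq, hslice]
  have hset : (pvPrefixSet : List (List Char))
      = ["enter".toList, "describe".toList, "provide".toList, "summarize".toList,
         "explain".toList, "insert".toList, "complete".toList] := by decide
  simp only [PySem.Set.contains, hset]
  rw [pvAnySwap]
  by_cases hnil : L = []
  · simp [hnil, pvTokens]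
  · simp only [hnil, if_false]
    have e1 : ("enter ".toList : List Char) = "enter".toList ++ [' '] := by decide
    have e2 : ("describe ".toList : List Char) = "describe".toList ++ [' '] := by decide
    have e3 : ("provide ".toList : List Char) = "provide".toList ++ [' '] := by decide
    have e4 : ("summarize ".toList : List Char) = "summarize".toList ++ [' '] := by decide
    have e5 : ("explain ".toList : List Char) = "explain".toList ++ [' '] := by decide
    have e6 : ("insert ".toList : List Char) = "insert".toList ++ [' '] := by decide
    have e7 : ("complete ".toList : List Char) = "complete".toList ++ [' '] := by decide
    simp only [List.any_cons, List.any_nil, Bool.or_false, e1, e2, e3, e4, e5, e6, e7]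
    rw [pvWord L _ (by decide), pvWord L _ (by decide), pvWord L _ (by decide),
        pvWord L _ (by decide), pvWord L _ (by decide), pvWord L _ (by decide),
        pvWord L _ (by decide)]
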